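-- pv_equiv track=rewrite | github.com/Alexander-Ling/cycif-seg | src/cycif_seg/preprocess/organize_cycles.py | _find_channel_index
-- ===== SOURCE A (Python) =====
-- def _find_channel_index(ch_names: list[str], marker: str) -> int | None:
--     m = (marker or "").strip().lower()
--     if not m:
--         return None
--     for i, nm in enumerate(ch_names):
--         if (nm or "").strip().lower() == m:
--             return i
--     # weak match: contains
--     for i, nm in enumerate(ch_names):
--         if m in (nm or "").strip().lower():
--             return i
--     return None
-- ===== SOURCE B (Python) =====
-- def _find_channel_index(ch_names: list[str], marker: str) -> int | None:
--     m = (marker or "").strip().lower()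
--     if not m:
--         return None
--     fallback = None
--     for i, nm in enumerate(ch_names):
--         n = (nm or "").strip().lower()
--         if n == m:
--             return i
--         if fallback is None and m in n:
--             fallback = i
--     return fallback
-- ===== Notes on version B (the rewrite author's own statement) =====
-- stated objective: alternative
-- what changed: Replaces A's two sequential scans (exact pass, then substring pass) by a single pass that returns an exact match immediately and remembers the first substring match as a fallback, normalizing each name only once.
import Mathlib
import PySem

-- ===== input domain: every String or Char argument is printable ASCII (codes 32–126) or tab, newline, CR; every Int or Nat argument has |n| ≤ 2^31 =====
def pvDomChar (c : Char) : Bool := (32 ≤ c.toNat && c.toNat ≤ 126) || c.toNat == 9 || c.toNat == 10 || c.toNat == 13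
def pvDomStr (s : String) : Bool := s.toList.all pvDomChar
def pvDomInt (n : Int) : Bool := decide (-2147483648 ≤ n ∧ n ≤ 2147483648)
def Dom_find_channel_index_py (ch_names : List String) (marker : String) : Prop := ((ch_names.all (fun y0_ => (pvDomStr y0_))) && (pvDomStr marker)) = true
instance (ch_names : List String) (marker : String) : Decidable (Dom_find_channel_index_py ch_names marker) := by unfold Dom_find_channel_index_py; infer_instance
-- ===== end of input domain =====

-- ===== PORT A =====
-- B changes the decomposition: one pass with a remembered substring fallback instead of A's two scans, normalizing each name once (equivalence proved below).
def pvNormA (s : String) : String := PySem.Str.lower (PySem.Str.strip s)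

def pvExactLoop : List String → String → Int → Option Int
  | [], _, _ => none
  | nm :: rest, m, i =>
    if pvNormA nm = m then some i else pvExactLoop rest m (i + 1)

def pvSubLoop : List String → String → Int → Option Int
  | [], _, _ => none
  | nm :: rest, m, i =>
    if PySem.Str.isIn m (pvNormA nm) then some i else pvSubLoop rest m (i + 1)

def find_channel_index_py (ch_names : List String) (marker : String) : Option Int :=
  let m := pvNormA marker
  if m = "" then none
  else
    match pvExactLoop ch_names m 0 with
    | some i => some i
    | none => pvSubLoop ch_names m 0

-- ===== PORT B =====
def pvNormB (s : String) : String := PySem.Str.lower (PySem.Str.strip s)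

def pvOnePass : List String → String → Int → Option Int → Option Int
  | [], _, _, fallback => fallback
  | nm :: rest, m, i, fallback =>
    let n := pvNormB nm
    if n = m then some i
    else if fallback = none ∧ PySem.Str.isIn m n then pvOnePass rest m (i + 1) (some i)
    else pvOnePass rest m (i + 1) fallback

def find_channel_index_py_alt (ch_names : List String) (marker : String) : Option Int :=
  let m := pvNormB marker
  if m = "" then none
  else pvOnePass ch_names m 0 none

-- ===== PRECONDITION & SPEC =====
def Spec_find_channel_index_py (ch_names : List String) (marker : String) (out : Option Int) : Prop := out = find_channel_index_py_alt ch_names marker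
instance (ch_names : List String) (marker : String) (out : Option Int) : Decidable (Spec_find_channel_index_py ch_names marker out) := by unfold Spec_find_channel_index_py; infer_instance

-- ===== CLAIM (what is proved, stated in full; the proofs are below) =====
def Claim_equal_find_channel_index_py : Prop := ∀ (ch_names : List String) (marker : String), Dom_find_channel_index_py ch_names marker → Spec_find_channel_index_py ch_names marker (find_channel_index_py ch_names marker)

-- ===== LEMMAS AND PROOFS =====
lemma pvOnePass_eq (xs : List String) (m : String) :
    ∀ (i : Int) (fb : Option Int),
      pvOnePass xs m i fb =
        match pvExactLoop xs m i with
        | some j => some j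
        | none => match fb with
                  | some k => some k
                  | none => pvSubLoop xs m i := by
  induction xs with
  | nil => intro i fb; cases fb <;> simp [pvOnePass, pvExactLoop, pvSubLoop]
  | cons nm rest ih =>
    intro i fb
    simp only [pvOnePass, pvExactLoop, pvSubLoop, pvNormA, pvNormB]
    by_cases hx : PySem.Str.lower (PySem.Str.strip nm) = m
    · simp [hx]
    · simp only [hx, if_false]
      cases fb with
      | some k =>
        rw [if_neg (by simp), ih]
      | none =>
        by_cases hs : PySem.Str.isIn m (PySem.Str.lower (PySem.Str.strip nm))
        · rw [if_pos ⟨rfl, hs⟩, ih, if_pos hs]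
        · rw [if_neg (fun h => hs h.2), ih, if_neg hs]

-- ===== VERDICT (by name: the statement is the Claim_ definition above) =====
theorem find_channel_index_py_spec : Claim_equal_find_channel_index_py := by
  intro ch_names marker _
  unfold Spec_find_channel_index_py find_channel_index_py find_channel_index_py_alt pvNormA pvNormB
  by_cases hm : PySem.Str.lower (PySem.Str.strip marker) = ""
  · simp [hm]
  · rw [if_neg hm, if_neg hm, pvOnePass_eq]
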